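-- pv_equiv track=rewrite | github.com/Revoxxi/Marlin_2.1.2_E3V3SE_STM32F401_C14HARDWARE | SlicerScripts/orca_parser.py | insert_raw_block
-- ===== SOURCE A (Python) =====
-- def insert_raw_block(lines, raw_block):
--     """
--     Inserts the RAW16 block into the G-code.
--     Strategy:
--       - If ; HEADER_BLOCK_END exists, insert right after it.
--     """
--     out_lines = []
--     inserted = False
--
--     for line in lines:
--         stripped = line.strip()
--
--         out_lines.append(line)
--
--         if stripped.startswith("; HEADER_BLOCK_END") and not inserted:
--             # Insert right after the Orca header block
--             for raw_line in raw_block: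
--                 out_lines.append(raw_line + "\n")
--             inserted = True
--
--     if not inserted and raw_block:
--         # If for some reason we don't find a place, put it at the end
--         out_lines.append("\n")
--         for raw_line in raw_block:
--             out_lines.append(raw_line + "\n")
--
--     return out_lines
-- ===== SOURCE B (Python) =====
-- def insert_raw_block(lines, raw_block):
--     """Locate the splice point first, then build the result by slicing."""
--     idx = next((i for i, l in enumerate(lines)
--                 if l.strip().startswith("; HEADER_BLOCK_END")), None)
--     tail = [r + "\n" for r in raw_block]
--     if idx is not None:
--         return lines[:idx + 1] + tail + lines[idx + 1:]
--     if raw_block: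
--         return list(lines) + ["\n"] + tail
--     return list(lines)
-- ===== Notes on version B (the rewrite author's own statement) =====
-- stated objective: simpler
-- what changed: B computes the insertion index once (first line whose stripped form starts with '; HEADER_BLOCK_END') and builds the output by list slicing, replacing A's flag-guarded accumulator loop with fallback state.
import Mathlib
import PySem

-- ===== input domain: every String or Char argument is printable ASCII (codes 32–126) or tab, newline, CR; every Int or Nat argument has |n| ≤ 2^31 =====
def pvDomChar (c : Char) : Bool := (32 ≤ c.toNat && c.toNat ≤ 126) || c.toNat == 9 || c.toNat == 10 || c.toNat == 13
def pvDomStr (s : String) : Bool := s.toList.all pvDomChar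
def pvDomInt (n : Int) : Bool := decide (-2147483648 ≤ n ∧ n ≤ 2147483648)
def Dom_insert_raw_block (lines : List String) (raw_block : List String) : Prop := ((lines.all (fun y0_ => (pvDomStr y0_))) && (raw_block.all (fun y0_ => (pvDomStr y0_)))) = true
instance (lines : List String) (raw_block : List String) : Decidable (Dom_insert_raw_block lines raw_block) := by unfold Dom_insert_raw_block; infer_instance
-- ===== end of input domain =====

-- B recomputes the insertion index once and builds the output by slicing; objective: simpler.

-- ===== PORT A =====
-- One pass with an accumulator and an 'inserted' flag; the inner for-loop over
-- raw_block is a foldl appending 'r ++ "\n"' items, as in the Python.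
def insert_raw_block (lines : List String) (raw_block : List String) : List String :=
  let st := lines.foldl (fun (st : List String × Bool) line =>
      let stripped := PySem.Str.strip line
      let out := st.1 ++ [line]
      if PySem.Str.startswith stripped "; HEADER_BLOCK_END" && !st.2 then
        (raw_block.foldl (fun o r => o ++ [r ++ "\n"]) out, true)
      else (out, st.2)) ([], false)
  if !st.2 && !raw_block.isEmpty then
    raw_block.foldl (fun o r => o ++ [r ++ "\n"]) (st.1 ++ ["\n"])
  else st.1

-- ===== PORT B =====
def insert_raw_block_alt (lines : List String) (raw_block : List String) : List String :=
  let tail := raw_block.map (fun r => r ++ "\n")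
  match lines.findIdx? (fun l =>
      PySem.Str.startswith (PySem.Str.strip l) "; HEADER_BLOCK_END") with
  | some i => lines.take (i + 1) ++ tail ++ lines.drop (i + 1)
  | none => if !raw_block.isEmpty then lines ++ ["\n"] ++ tail else lines

-- ===== PRECONDITION & SPEC =====
def Spec_insert_raw_block (lines : List String) (raw_block : List String) (out : List String) : Prop := out = insert_raw_block_alt lines raw_block
instance (lines : List String) (raw_block : List String) (out : List String) : Decidable (Spec_insert_raw_block lines raw_block out) := by unfold Spec_insert_raw_block; infer_instance

-- ===== CLAIM (what is proved, stated in full; the proofs are below) =====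
def Claim_equal_insert_raw_block : Prop := ∀ (lines : List String) (raw_block : List String), Dom_insert_raw_block lines raw_block → Spec_insert_raw_block lines raw_block (insert_raw_block lines raw_block)

-- ===== LEMMAS AND PROOFS =====

def pvMark (l : String) : Bool :=
  PySem.Str.startswith (PySem.Str.strip l) "; HEADER_BLOCK_END"

lemma pv_inner_foldl (raw_block : List String) (o : List String) :
    raw_block.foldl (fun o r => o ++ [r ++ "\n"]) o
      = o ++ raw_block.map (fun r => r ++ "\n") := by
  induction raw_block generalizing o with
  | nil => simp
  | cons r rs ih => simp [List.foldl_cons, ih]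

lemma pv_flatten_map (raw_block : List String) :
    (List.map (fun r => [r ++ "\n"]) raw_block).flatten
      = List.map (fun r => r ++ "\n") raw_block := by
  induction raw_block with
  | nil => rfl
  | cons r rs ih => simp [ih]

lemma pv_loop_true (raw_block : List String) (lines : List String) (acc : List String) :
    lines.foldl (fun (st : List String × Bool) line =>
      let stripped := PySem.Str.strip line
      let out := st.1 ++ [line]
      if PySem.Str.startswith stripped "; HEADER_BLOCK_END" && !st.2 then
        (raw_block.foldl (fun o r => o ++ [r ++ "\n"]) out, true)
      else (out, st.2)) (acc, true) = (acc ++ lines, true) := by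
  induction lines generalizing acc with
  | nil => simp
  | cons l ls ih =>
    simp only [List.foldl_cons]
    rw [if_neg (by simp)]
    rw [ih]
    simp

lemma pv_loop (raw_block : List String) (lines : List String) (acc : List String) :
    lines.foldl (fun (st : List String × Bool) line =>
      let stripped := PySem.Str.strip line
      let out := st.1 ++ [line]
      if PySem.Str.startswith stripped "; HEADER_BLOCK_END" && !st.2 then
        (raw_block.foldl (fun o r => o ++ [r ++ "\n"]) out, true)
      else (out, st.2)) (acc, false)
    = match lines.findIdx? pvMark with
      | some i => (acc ++ lines.take (i + 1) ++ raw_block.map (fun r => r ++ "\n")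
                     ++ lines.drop (i + 1), true)
      | none => (acc ++ lines, false) := by
  induction lines generalizing acc with
  | nil => simp
  | cons l ls ih =>
    by_cases h : pvMark l
    · have hm : PySem.Str.startswith (PySem.Str.strip l) "; HEADER_BLOCK_END" = true := h
      simp only [List.foldl_cons, List.findIdx?_cons, h, if_pos rfl]
      rw [if_pos (by rw [hm]; rfl)]
      rw [pv_inner_foldl, pv_loop_true]
      simp
    · have hm : PySem.Str.startswith (PySem.Str.strip l) "; HEADER_BLOCK_END" = false := by
        simpa [pvMark] using h
      simp only [List.foldl_cons, List.findIdx?_cons, h, Bool.false_eq_true, if_false]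
      rw [if_neg (by rw [hm]; simp)]
      rw [ih]
      cases hfi : ls.findIdx? pvMark with
      | none => simp
      | some i => simp [List.take_succ_cons, List.drop_succ_cons]

-- ===== VERDICT (by name: the statement is the Claim_ definition above) =====
theorem insert_raw_block_spec : Claim_equal_insert_raw_block := by
  intro lines raw_block _
  unfold Spec_insert_raw_block insert_raw_block insert_raw_block_alt
  rw [show (fun l => PySem.Str.startswith (PySem.Str.strip l) "; HEADER_BLOCK_END") = pvMark from rfl]
  rw [pv_loop]
  cases hfi : lines.findIdx? pvMark with
  | some i => simp
  | none =>
    by_cases hrb : raw_block.isEmpty <;>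
      simp [hrb, pv_flatten_map]
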